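-- pv_equiv track=rewrite | github.com/csandoval18/DSA | CodeNinjas/Binary Search/find_similarities_two_arrs.py | findSimilaritBS
-- ===== SOURCE A (Python) =====
-- def binarySearch(arr, t):
--   n = len(arr)
--   l, r = 0, len(arr)-1
--
--   while l<=r:
--     m = (l+r)//2
--
--     if arr[m] == t:
--       return True
--     elif arr[m] < t:
--       l = m+1
--     else:
--       r = m-1
--   return False
--
-- def findSimilaritBS(arr1, arr2, n, m):
--     arr1.sort()
--     arr2.sort()
--
--     common_count = 0
--     unique_count = 0
--
--     for num in arr1:
--       if binarySearch(arr2, num):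
--         common_count += 1
--       else:
--         unique_count += 1
--
--     for num in arr2:
--       if not binarySearch(arr1, num):
--         unique_count += 1
--
--     return common_count, unique_count
-- ===== SOURCE B (Python) =====
-- def findSimilaritBS(arr1, arr2, n, m):
--     # Note: A sorts arr1/arr2 in place; B does not need to and leaves them unchanged
--     # (return-value equivalence only).
--     s1 = set(arr1)
--     s2 = set(arr2)
--     common = sum(1 for x in arr1 if x in s2)
--     unique = (len(arr1) - common) + sum(1 for y in arr2 if y not in s1)
--     return common, unique
-- ===== Notes on version B (the rewrite author's own statement) =====
-- stated objective: faster
-- what changed: Replaces sort-both-arrays plus a binary search per element with two hash sets and two linear membership passes (unique on the first array obtained as len(arr1)-common), dropping the sorts and per-element searches; B also does not mutate the input lists.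
import Mathlib
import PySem

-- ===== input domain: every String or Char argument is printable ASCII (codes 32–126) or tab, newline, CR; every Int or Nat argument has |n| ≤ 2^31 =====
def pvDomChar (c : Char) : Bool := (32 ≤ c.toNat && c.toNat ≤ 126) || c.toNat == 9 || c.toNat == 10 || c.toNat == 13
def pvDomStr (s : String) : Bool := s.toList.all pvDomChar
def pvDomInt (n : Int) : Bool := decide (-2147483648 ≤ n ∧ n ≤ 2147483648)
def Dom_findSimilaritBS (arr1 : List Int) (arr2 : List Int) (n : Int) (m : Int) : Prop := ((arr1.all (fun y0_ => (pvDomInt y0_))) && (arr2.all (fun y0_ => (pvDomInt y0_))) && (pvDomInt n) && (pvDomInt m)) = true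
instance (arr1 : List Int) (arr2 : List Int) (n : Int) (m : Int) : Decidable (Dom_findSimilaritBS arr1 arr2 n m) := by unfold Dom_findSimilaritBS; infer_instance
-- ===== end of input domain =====

-- B replaces sort + per-element binary search by two hash sets and two linear passes; A sorts both
-- input lists in place while B leaves them unchanged — the equivalence proved is about the return value.

-- ===== PORT A =====
-- the while-loop of binarySearch, on the loop state (l, r); the fuel argument only makes the
-- recursion structural: arr.length + 1 steps always suffice (proved in bsAux_iff / binarySearch_eq_mem)
def bsAux (arr : List Int) (t : Int) : Nat → Int → Int → Bool
  | 0, _, _ => false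
  | fuel + 1, l, r =>
    if l ≤ r then
      let m := PySem.Int.floordiv (l + r) 2
      match PySem.List.pyGet? arr m with
      | none => false  -- Python would raise IndexError; unreachable for A's calls (l, r stay in range)
      | some v =>
        if v = t then true
        else if v < t then bsAux arr t fuel (m + 1) r
        else bsAux arr t fuel l (m - 1)
    else false

def binarySearch (arr : List Int) (t : Int) : Bool :=
  bsAux arr t (arr.length + 1) 0 ((arr.length : Int) - 1)

def findSimilaritBS (arr1 : List Int) (arr2 : List Int) (n : Int) (m : Int) : Int × Int :=
  let a1 := PySem.List.sorted arr1 (fun x => x) false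
  let a2 := PySem.List.sorted arr2 (fun x => x) false
  -- first loop: both counters, one pass over a1
  let cu : Int × Int :=
    a1.foldl (fun p num => if binarySearch a2 num then (p.1 + 1, p.2) else (p.1, p.2 + 1)) (0, 0)
  -- second loop over a2
  let u2 : Int :=
    a2.foldl (fun u num => if !(binarySearch a1 num) then u + 1 else u) cu.2
  (cu.1, u2)

-- ===== PORT B =====
def findSimilaritBS_alt (arr1 : List Int) (arr2 : List Int) (n : Int) (m : Int) : Int × Int :=
  let s1 := PySem.Set.ofList arr1
  let s2 := PySem.Set.ofList arr2
  let common : Int := (arr1.countP (fun x => PySem.Set.contains s2 x) : Nat)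
  let unique : Int :=
    ((arr1.length : Int) - common) + (arr2.countP (fun y => !PySem.Set.contains s1 y) : Nat)
  (common, unique)

-- ===== PRECONDITION & SPEC =====
def Spec_findSimilaritBS (arr1 : List Int) (arr2 : List Int) (n : Int) (m : Int) (out : Int × Int) : Prop := out = findSimilaritBS_alt arr1 arr2 n m
instance (arr1 : List Int) (arr2 : List Int) (n : Int) (m : Int) (out : Int × Int) : Decidable (Spec_findSimilaritBS arr1 arr2 n m out) := by unfold Spec_findSimilaritBS; infer_instance

-- ===== CLAIM (what is proved, stated in full; the proofs are below) =====
def Claim_equal_findSimilaritBS : Prop := ∀ (arr1 : List Int) (arr2 : List Int) (n : Int) (m : Int), Dom_findSimilaritBS arr1 arr2 n m → Spec_findSimilaritBS arr1 arr2 n m (findSimilaritBS arr1 arr2 n m)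

-- ===== LEMMAS AND PROOFS =====

theorem sorted_getElem_le (arr : List Int) (hs : arr.Pairwise (· ≤ ·)) (i j : Nat)
    (hij : i ≤ j) (hj : j < arr.length) : arr[i] ≤ arr[j] := by
  rcases Nat.lt_or_eq_of_le hij with h | h
  · exact (List.pairwise_iff_getElem.mp hs) i j (by omega) hj h
  · subst h; exact le_refl _

-- binary search on a (≤)-sorted list finds t iff some index in [l, r] holds t
theorem bsAux_iff (arr : List Int) (t : Int) (hs : arr.Pairwise (· ≤ ·)) (fuel : Nat) :
    ∀ l r : Int, 0 ≤ l → r < (arr.length : Int) → r + 1 - l < (fuel : Int) →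
    (bsAux arr t fuel l r = true ↔
      ∃ i : Nat, l ≤ (i : Int) ∧ (i : Int) ≤ r ∧ arr[i]? = some t) := by
  induction fuel with
  | zero =>
    intro l r hl hr hf
    simp only [bsAux, Bool.false_eq_true, false_iff]
    rintro ⟨i, h1, h2, _⟩
    omega
  | succ f ih =>
    intro l r hl hr hf
    by_cases h : l ≤ r
    · have hm := PySem.Int.floordiv_two_mid_bounds h
      have hsome := PySem.List.pyGet?_eq_some_getElem arr
        (i := PySem.Int.floordiv (l + r) 2) (by omega) (by omega)
      have hstep : bsAux arr t (f + 1) l r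
          = (if arr[(PySem.Int.floordiv (l + r) 2).toNat] = t then true
             else if arr[(PySem.Int.floordiv (l + r) 2).toNat] < t then
               bsAux arr t f (PySem.Int.floordiv (l + r) 2 + 1) r
             else bsAux arr t f l (PySem.Int.floordiv (l + r) 2 - 1)) := by
        conv_lhs => rw [bsAux]
        simp only [if_pos h, hsome]
      rw [hstep]
      by_cases hvt : arr[(PySem.Int.floordiv (l + r) 2).toNat] = t
      · simp only [if_pos hvt, true_iff]
        exact ⟨(PySem.Int.floordiv (l + r) 2).toNat, by omega, by omega,
          by rw [List.getElem?_eq_getElem (by omega)]; exact congrArg some hvt⟩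
      · simp only [if_neg hvt]
        by_cases hlt : arr[(PySem.Int.floordiv (l + r) 2).toNat] < t
        · simp only [if_pos hlt]
          rw [ih (PySem.Int.floordiv (l + r) 2 + 1) r (by omega) hr (by omega)]
          constructor
          · rintro ⟨i, h1, h2, h3⟩; exact ⟨i, by omega, h2, h3⟩
          · rintro ⟨i, h1, h2, h3⟩
            refine ⟨i, ?_, h2, h3⟩
            by_contra hc
            -- i ≤ m, so arr[i] ≤ arr[m] < t, contradicting arr[i] = t
            have hi : i < arr.length := by omega
            have hile : i ≤ (PySem.Int.floordiv (l + r) 2).toNat := by omega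
            have hmono := sorted_getElem_le arr hs i
              (PySem.Int.floordiv (l + r) 2).toNat hile (by omega)
            rw [List.getElem?_eq_getElem hi] at h3
            have h3' : arr[i] = t := by injection h3
            rw [h3'] at hmono
            exact absurd hmono (not_le.mpr hlt)
        · simp only [if_neg hlt]
          rw [ih l (PySem.Int.floordiv (l + r) 2 - 1) hl (by omega) (by omega)]
          constructor
          · rintro ⟨i, h1, h2, h3⟩; exact ⟨i, h1, by omega, h3⟩
          · rintro ⟨i, h1, h2, h3⟩
            refine ⟨i, h1, ?_, h3⟩
            by_contra hc
            -- m ≤ i, so arr[m] ≤ arr[i] = t with arr[m] ≥ t, but arr[m] ≠ t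
            have hi : i < arr.length := by omega
            have hmle : (PySem.Int.floordiv (l + r) 2).toNat ≤ i := by omega
            have hmono := sorted_getElem_le arr hs
              (PySem.Int.floordiv (l + r) 2).toNat i hmle hi
            rw [List.getElem?_eq_getElem hi] at h3
            have h3' : arr[i] = t := by injection h3
            rw [h3'] at hmono
            exact hvt (le_antisymm hmono (not_lt.mp hlt))
    · conv_lhs => rw [bsAux]
      simp only [if_neg h, Bool.false_eq_true, false_iff]
      rintro ⟨i, h1, h2, _⟩
      omega

-- binarySearch on a sorted list is membership
theorem binarySearch_eq_mem (arr : List Int) (t : Int) (hs : arr.Pairwise (· ≤ ·)) :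
    binarySearch arr t = decide (t ∈ arr) := by
  unfold binarySearch
  have h := bsAux_iff arr t hs (arr.length + 1) 0 ((arr.length : Int) - 1)
    (le_refl 0) (by omega) (by push_cast; omega)
  rcases hb : bsAux arr t (arr.length + 1) 0 ((arr.length : Int) - 1) with _ | _
  · rw [hb] at h
    simp only [Bool.false_eq_true, false_iff] at h
    symm
    simp only [decide_eq_false_iff_not]
    intro hmem
    obtain ⟨i, hi, hget⟩ := List.mem_iff_getElem.mp hmem
    exact h ⟨i, by omega, by omega,
      by rw [List.getElem?_eq_getElem hi]; exact congrArg some hget⟩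
  · rw [hb] at h
    simp only [true_iff] at h
    obtain ⟨i, h1, h2, h3⟩ := h
    have hi : i < arr.length := by omega
    rw [List.getElem?_eq_getElem hi] at h3
    have : t ∈ arr := by
      rw [List.mem_iff_getElem]; exact ⟨i, hi, by injection h3⟩
    simp [this]

-- the first loop of A computes both counters at once
theorem foldl_pair_count (p : Int → Bool) (l : List Int) (c u : Int) :
    l.foldl (fun q num => if p num then (q.1 + 1, q.2) else (q.1, q.2 + 1)) (c, u)
      = (c + l.countP p, u + l.countP (fun x => !p x)) := by
  induction l generalizing c u with
  | nil => simp
  | cons x xs ih =>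
    rcases hx : p x with _ | _ <;>
      simp [List.foldl_cons, hx, ih, add_assoc, add_comm, add_left_comm]

theorem countP_complement (l : List Int) (p : Int → Bool) :
    l.countP p + l.countP (fun x => !p x) = l.length := by
  induction l with
  | nil => simp
  | cons x xs ih =>
    rcases hx : p x with _ | _ <;> simp [hx] <;> omega

theorem contains_ofList_eq (l : List Int) (x : Int) :
    PySem.Set.contains (PySem.Set.ofList l) x = decide (x ∈ l) := by
  rcases h : PySem.Set.contains (PySem.Set.ofList l) x with _ | _
  · symm
    simp only [decide_eq_false_iff_not]
    intro hmem
    have := (PySem.Set.contains_iff _ _).mpr ((PySem.Set.mem_ofList _ _).mpr hmem)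
    rw [h] at this
    cases this
  · symm
    simp only [decide_eq_true_eq]
    exact (PySem.Set.mem_ofList _ _).mp ((PySem.Set.contains_iff _ _).mp h)

theorem findSimilaritBS_spec : Claim_equal_findSimilaritBS := by
  intro arr1 arr2 n m _
  unfold Spec_findSimilaritBS findSimilaritBS findSimilaritBS_alt
  simp only []
  have hs1 : (PySem.List.sorted arr1 (fun x => x) false).Pairwise (· ≤ ·) :=
    PySem.List.sorted_pairwise arr1 (fun x => x)
  have hs2 : (PySem.List.sorted arr2 (fun x => x) false).Pairwise (· ≤ ·) :=
    PySem.List.sorted_pairwise arr2 (fun x => x)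
  have hp1 : (PySem.List.sorted arr1 (fun x => x) false).Perm arr1 :=
    PySem.List.sorted_perm arr1 (fun x => x) false
  have hp2 : (PySem.List.sorted arr2 (fun x => x) false).Perm arr2 :=
    PySem.List.sorted_perm arr2 (fun x => x) false
  -- binarySearch over the sorted copies is membership in the original lists
  have hb2 : ∀ x, binarySearch (PySem.List.sorted arr2 (fun x => x) false) x
      = decide (x ∈ arr2) := by
    intro x
    rw [binarySearch_eq_mem _ _ hs2]
    simp [hp2.mem_iff]
  have hb1 : ∀ x, binarySearch (PySem.List.sorted arr1 (fun x => x) false) x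
      = decide (x ∈ arr1) := by
    intro x
    rw [binarySearch_eq_mem _ _ hs1]
    simp [hp1.mem_iff]
  -- set membership in B is membership in the original lists
  have hc2 : ∀ x, PySem.Set.contains (PySem.Set.ofList arr2) x = decide (x ∈ arr2) :=
    fun x => contains_ofList_eq arr2 x
  have hc1 : ∀ x, PySem.Set.contains (PySem.Set.ofList arr1) x = decide (x ∈ arr1) :=
    fun x => contains_ofList_eq arr1 x
  rw [foldl_pair_count]
  rw [PySem.List.foldl_if_add_one]
  have e1 : (PySem.List.sorted arr1 (fun x => x) false).countP
      (fun num => binarySearch (PySem.List.sorted arr2 (fun x => x) false) num)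
      = arr1.countP (fun x => PySem.Set.contains (PySem.Set.ofList arr2) x) := by
    have h1 : (PySem.List.sorted arr1 (fun x => x) false).countP
        (fun num => binarySearch (PySem.List.sorted arr2 (fun x => x) false) num)
        = (PySem.List.sorted arr1 (fun x => x) false).countP (fun x => decide (x ∈ arr2)) :=
      List.countP_congr (fun a _ => by rw [hb2 a])
    have h2 : arr1.countP (fun x => PySem.Set.contains (PySem.Set.ofList arr2) x)
        = arr1.countP (fun x => decide (x ∈ arr2)) :=
      List.countP_congr (fun a _ => by rw [hc2 a])
    rw [h1, h2, hp1.countP_eq]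
  have e1n : (PySem.List.sorted arr1 (fun x => x) false).countP
      (fun num => !binarySearch (PySem.List.sorted arr2 (fun x => x) false) num)
      = arr1.length - arr1.countP (fun x => PySem.Set.contains (PySem.Set.ofList arr2) x) := by
    have h := countP_complement (PySem.List.sorted arr1 (fun x => x) false)
      (fun num => binarySearch (PySem.List.sorted arr2 (fun x => x) false) num)
    rw [e1] at h
    have hlen := hp1.length_eq
    have hle := List.countP_le_length
      (l := arr1) (p := fun x => PySem.Set.contains (PySem.Set.ofList arr2) x)
    omega
  have e2 : (PySem.List.sorted arr2 (fun x => x) false).countP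
      (fun num => !binarySearch (PySem.List.sorted arr1 (fun x => x) false) num)
      = arr2.countP (fun y => !PySem.Set.contains (PySem.Set.ofList arr1) y) := by
    have h1 : (PySem.List.sorted arr2 (fun x => x) false).countP
        (fun num => !binarySearch (PySem.List.sorted arr1 (fun x => x) false) num)
        = (PySem.List.sorted arr2 (fun x => x) false).countP (fun x => !decide (x ∈ arr1)) :=
      List.countP_congr (fun a _ => by rw [hb1 a])
    have h2 : arr2.countP (fun y => !PySem.Set.contains (PySem.Set.ofList arr1) y)
        = arr2.countP (fun y => !decide (y ∈ arr1)) :=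
      List.countP_congr (fun a _ => by rw [hc1 a])
    rw [h1, h2, hp2.countP_eq]
  rw [e1, e1n, e2]
  have hcle := List.countP_le_length
    (l := arr1) (p := fun x => PySem.Set.contains (PySem.Set.ofList arr2) x)
  simp only [Prod.mk.injEq]
  constructor <;> omega
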